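-- pv_equiv track=rewrite | github.com/ali-john/Leetcode-solutions | my-folder/4229-trim-trailing-vowels/solution.py | trimTrailingVowels
-- ===== SOURCE A (Python) =====
-- def trimTrailingVowels(s: str) -> str:
--     n = len(s)
--
--
--     output = []
--     vowels = ['a', 'e', 'i', 'o','u']
--
--     hit_consonant = False
--     for i in range(n-1, -1, -1):
--         if s[i] in vowels:
--             continue
--         else:
--             output.append(s[:i+1])
--             break
--     return "".join(output)
-- ===== SOURCE B (Python) =====
-- def trimTrailingVowels(s: str) -> str:
--     # Single forward pass: remember the position just past the last non-vowel
--     # character; the answer is the prefix up to that position.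
--     keep = 0
--     for i, c in enumerate(s):
--         if c not in 'aeiou':
--             keep = i + 1
--     return s[:keep]
-- ===== Notes on version B (the rewrite author's own statement) =====
-- stated objective: alternative
-- what changed: Replaced A's backward scan-with-break over indices by a forward pass that maintains the position just past the last non-vowel character and returns that prefix.
import Mathlib
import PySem

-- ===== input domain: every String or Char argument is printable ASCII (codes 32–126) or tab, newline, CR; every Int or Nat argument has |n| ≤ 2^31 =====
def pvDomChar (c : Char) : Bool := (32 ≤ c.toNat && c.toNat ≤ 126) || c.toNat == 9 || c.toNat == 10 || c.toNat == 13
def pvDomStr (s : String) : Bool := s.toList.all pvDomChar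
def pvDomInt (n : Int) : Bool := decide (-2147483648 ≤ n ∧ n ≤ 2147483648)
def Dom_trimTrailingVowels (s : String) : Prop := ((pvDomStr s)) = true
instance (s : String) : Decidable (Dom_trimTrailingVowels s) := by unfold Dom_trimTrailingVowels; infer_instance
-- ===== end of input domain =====

-- B replaces A's backward scan-with-break by a forward pass tracking the position past the last non-vowel; alternative decomposition, same cost.


-- ===== PORT A =====
-- the loop `for i in range(n-1, -1, -1)` with `continue`/`break`, counting down; argument i+1 means current index i
def trimTrailingVowelsLoop (cs : List Char) : Nat → List (List Char)
  | 0 => []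
  | i + 1 =>
    if cs.getD i ' ' ∈ ['a', 'e', 'i', 'o', 'u'] then
      trimTrailingVowelsLoop cs i            -- continue
    else
      [PySem.List.slice cs none (some ((i : Int) + 1))]   -- output.append(s[:i+1]); break

def trimTrailingVowels (s : String) : String :=
  -- "".join(output)
  String.mk (trimTrailingVowelsLoop s.toList s.toList.length).flatten

-- ===== PORT B =====
-- forward pass over enumerate(s): keep = i+1 at each non-vowel; return s[:keep]
def trimTrailingVowels_alt (s : String) : String :=
  let keep : Int :=
    (PySem.List.enumerate s.toList 0).foldl
      (fun k p => if p.2 ∈ ['a', 'e', 'i', 'o', 'u'] then k else p.1 + 1) 0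
  String.mk (PySem.List.slice s.toList none (some keep))

-- ===== PRECONDITION & SPEC =====
def Spec_trimTrailingVowels (s : String) (out : String) : Prop := out = trimTrailingVowels_alt s
instance (s : String) (out : String) : Decidable (Spec_trimTrailingVowels s out) := by unfold Spec_trimTrailingVowels; infer_instance

-- ===== CLAIM (what is proved, stated in full; the proofs are below) =====
def Claim_equal_trimTrailingVowels : Prop := ∀ (s : String), Dom_trimTrailingVowels s → Spec_trimTrailingVowels s (trimTrailingVowels s)

-- ===== LEMMAS AND PROOFS =====

-- A's loop result = the reverse of dropWhile-vowels over the reversed prefix of length i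
theorem trimTrailingVowelsLoop_eq (cs : List Char) :
    ∀ i, i ≤ cs.length →
      (trimTrailingVowelsLoop cs i).flatten
        = ((cs.take i).reverse.dropWhile (fun c => c ∈ ['a', 'e', 'i', 'o', 'u'])).reverse := by
  intro i
  induction i with
  | zero => simp [trimTrailingVowelsLoop]
  | succ i ih =>
    intro hle
    have hi : i < cs.length := Nat.lt_of_succ_le hle
    have htake : cs.take (i + 1) = cs.take i ++ [cs[i]] := by
      rw [List.take_add_one, List.getElem?_eq_getElem hi]; rfl
    have hget : cs.getD i ' ' = cs[i] := by
      simp [List.getD, List.getElem?_eq_getElem hi]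
    rw [htake]
    simp only [List.reverse_append, List.reverse_singleton, List.singleton_append]
    by_cases hv : cs[i] ∈ ['a', 'e', 'i', 'o', 'u']
    · rw [trimTrailingVowelsLoop, if_pos (hget ▸ hv), ih (Nat.le_of_lt hi)]
      congr 1
      rw [List.dropWhile_cons, if_pos (by simpa using hv)]
    · rw [trimTrailingVowelsLoop, if_neg (hget ▸ hv)]
      have hslice : PySem.List.slice cs none (some ((i : Int) + 1)) = cs.take (i + 1) := by
        have h1 : ((i : Int) + 1) = ((i + 1 : Nat) : Int) := by push_cast; ring
        rw [h1, PySem.List.slice_to cs (by exact_mod_cast Nat.zero_le _)]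
        simp
      rw [hslice, htake, List.dropWhile_cons, if_neg (by simpa using hv)]
      simp

-- B's fold computes the length (as Int) of that same trimmed prefix
theorem trimTrailingVowels_fold_eq (cs : List Char) :
    (PySem.List.enumerate cs 0).foldl
        (fun k p => if p.2 ∈ ['a', 'e', 'i', 'o', 'u'] then k else p.1 + 1) 0
      = (((cs.reverse.dropWhile (fun c => c ∈ ['a', 'e', 'i', 'o', 'u'])).length : Int)) := by
  induction cs using List.reverseRecOn with
  | nil => simp [PySem.List.enumerate]
  | append_singleton xs c ih =>
    rw [PySem.List.enumerate_append, List.foldl_append, ih]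
    simp only [PySem.List.enumerate, List.foldl_cons, List.foldl_nil,
      List.reverse_append, List.reverse_singleton, List.singleton_append, List.dropWhile_cons]
    by_cases hv : c ∈ ['a', 'e', 'i', 'o', 'u']
    · simp [hv]
    · simp only [hv, decide_false, Bool.false_eq_true, if_false, List.length_cons]
      simp

-- ===== VERDICT (by name: the statement is the Claim_ definition above) =====
theorem trimTrailingVowels_spec : Claim_equal_trimTrailingVowels := by
  intro s _
  unfold Spec_trimTrailingVowels trimTrailingVowels trimTrailingVowels_alt
  simp only [trimTrailingVowels_fold_eq,
    trimTrailingVowelsLoop_eq s.toList s.toList.length (Nat.le_refl _), List.take_length]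
  rw [PySem.List.slice_to _ (by exact_mod_cast Nat.zero_le _), Int.toNat_natCast]
  have hpre : (s.toList.reverse.dropWhile (fun c => c ∈ ['a', 'e', 'i', 'o', 'u'])).reverse <+: s.toList := by
    have hsuf : s.toList.reverse.dropWhile (fun c => c ∈ ['a', 'e', 'i', 'o', 'u']) <:+ s.toList.reverse :=
      List.dropWhile_suffix _
    simpa using hsuf.reverse
  have := List.prefix_iff_eq_take.mp hpre
  simp only [List.length_reverse] at this
  rw [← this]
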